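-- pv_equiv track=rewrite | github.com/Jia-520-only/NagaAgent-Custom-Modded-Version | Undefined/src/Undefined/skills/tools/__init__.py | _categorize_tools
-- ===== SOURCE A (Python) =====
-- def _categorize_tools(
--     tool_names: list[str]
-- ) -> tuple[list[str], list[str], list[str]]:
--     """将工具按类型分类。
--
--     Args:
--         tool_names: 工具名称列表
--
--     Returns:
--         (基础工具列表, 工具集工具列表, MCP 工具列表)
--     """
--     basic_tools = [name for name in tool_names if "." not in name]
--     toolset_tools = [
--         name for name in tool_names if "." in name and not name.startswith("mcp.")
--     ]
--     mcp_tools = [name for name in tool_names if name.startswith("mcp.")]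
--     return basic_tools, toolset_tools, mcp_tools
-- ===== SOURCE B (Python) =====
-- def _categorize_tools(
--     tool_names: list[str]
-- ) -> tuple[list[str], list[str], list[str]]:
--     basic_tools, toolset_tools, mcp_tools = [], [], []
--     for name in tool_names:
--         if name.startswith("mcp."):
--             mcp_tools.append(name)
--         elif "." in name:
--             toolset_tools.append(name)
--         else:
--             basic_tools.append(name)
--     return basic_tools, toolset_tools, mcp_tools
-- ===== Notes on version B (the rewrite author's own statement) =====
-- stated objective: simpler
-- what changed: replaces A's three separate filtering passes over tool_names with one loop that classifies each name into exactly one of three accumulator lists via mutually exclusive branches (mcp-prefix test first)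
import Mathlib
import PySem

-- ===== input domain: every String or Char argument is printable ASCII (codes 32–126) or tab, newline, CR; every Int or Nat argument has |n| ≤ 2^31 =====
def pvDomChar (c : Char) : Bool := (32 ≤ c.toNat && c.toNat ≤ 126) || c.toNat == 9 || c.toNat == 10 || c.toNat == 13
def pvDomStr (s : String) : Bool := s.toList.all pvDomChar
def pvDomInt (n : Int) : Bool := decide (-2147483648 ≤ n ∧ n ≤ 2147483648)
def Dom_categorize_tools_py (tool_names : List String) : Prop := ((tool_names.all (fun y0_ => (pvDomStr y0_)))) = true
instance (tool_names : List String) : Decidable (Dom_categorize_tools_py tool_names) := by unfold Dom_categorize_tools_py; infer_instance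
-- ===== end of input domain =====

-- ===== PORT A =====
-- B replaces A's three filtering passes with one classifying fold; objective: simpler.
def categorize_tools_py (tool_names : List String) : List String × List String × List String :=
  let basic_tools := tool_names.filter (fun name => !(PySem.Str.isIn "." name))
  let toolset_tools := tool_names.filter (fun name => PySem.Str.isIn "." name && !(PySem.Str.startswith name "mcp."))
  let mcp_tools := tool_names.filter (fun name => PySem.Str.startswith name "mcp.")
  (basic_tools, toolset_tools, mcp_tools)

-- ===== PORT B =====
def categorize_tools_py_alt (tool_names : List String) : List String × List String × List String :=
  tool_names.foldl
    (fun acc name =>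
      let (basic_tools, toolset_tools, mcp_tools) := acc
      if PySem.Str.startswith name "mcp." then (basic_tools, toolset_tools, mcp_tools ++ [name])
      else if PySem.Str.isIn "." name then (basic_tools, toolset_tools ++ [name], mcp_tools)
      else (basic_tools ++ [name], toolset_tools, mcp_tools))
    ([], [], [])

-- ===== PRECONDITION & SPEC =====
def Spec_categorize_tools_py (tool_names : List String) (out : List String × List String × List String) : Prop := out = categorize_tools_py_alt tool_names
instance (tool_names : List String) (out : List String × List String × List String) : Decidable (Spec_categorize_tools_py tool_names out) := by unfold Spec_categorize_tools_py; infer_instance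

-- ===== CLAIM (what is proved, stated in full; the proofs are below) =====
def Claim_equal_categorize_tools_py : Prop := ∀ (tool_names : List String), Dom_categorize_tools_py tool_names → Spec_categorize_tools_py tool_names (categorize_tools_py tool_names)

-- ===== LEMMAS AND PROOFS =====

-- a name starting with "mcp." contains "."
theorem startswith_mcp_isIn (n : String) (h : PySem.Str.startswith n "mcp." = true) :
    PySem.Str.isIn "." n = true := by
  rw [PySem.Str.startswith_eq] at h
  rw [PySem.Str.isIn_eq]
  have hp : ("mcp.".toList) <+: n.toList := (PySem.Chars.startswith_iff _ _).mp h
  have hi : (".".toList) <:+: ("mcp.".toList) := by decide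
  exact (PySem.Chars.isIn_iff_infix _ _).mpr (hi.trans hp.isInfix)

theorem alt_foldl (l : List String) (b t m : List String) :
    l.foldl
      (fun acc name =>
        let (basic_tools, toolset_tools, mcp_tools) := acc
        if PySem.Str.startswith name "mcp." then (basic_tools, toolset_tools, mcp_tools ++ [name])
        else if PySem.Str.isIn "." name then (basic_tools, toolset_tools ++ [name], mcp_tools)
        else (basic_tools ++ [name], toolset_tools, mcp_tools))
      (b, t, m)
    = (b ++ l.filter (fun name => !(PySem.Str.isIn "." name)),
       t ++ l.filter (fun name => PySem.Str.isIn "." name && !(PySem.Str.startswith name "mcp.")),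
       m ++ l.filter (fun name => PySem.Str.startswith name "mcp.")) := by
  induction l generalizing b t m with
  | nil => simp
  | cons n rest ih =>
    simp at ih
    by_cases hs : PySem.Str.startswith n "mcp." = true
    · have hd := startswith_mcp_isIn n hs
      simp at hs hd
      simp [List.foldl_cons, hs, hd, ih, List.filter_cons]
    · by_cases hd : PySem.Str.isIn "." n = true
      · simp at hs hd
        simp [List.foldl_cons, hs, hd, ih, List.filter_cons]
      · simp at hs hd
        simp [List.foldl_cons, hs, hd, ih, List.filter_cons]

-- ===== VERDICT (by name: the statement is the Claim_ definition above) =====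
theorem categorize_tools_py_spec : Claim_equal_categorize_tools_py := by
  intro tool_names _
  unfold Spec_categorize_tools_py categorize_tools_py categorize_tools_py_alt
  rw [alt_foldl]
  simp
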